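-- pv_equiv track=rewrite | github.com/youshengithub/y_compiler | preprocesser.py | remove_spaces_around_symbols
-- ===== SOURCE A (Python) =====
-- def remove_spaces_around_symbols(s):
--     result=[]
--     last_char_was_non_alpha_numeric = None
--
--     for char in s:
--         # 检查当前字符是否为空格
--         if char.isspace():
--             # 如果前一个字符是非字母数字，则跳过此空格
--             if last_char_was_non_alpha_numeric:
--                 continue
--             # 否则，添加空格到结果
--             else:
--                 result.append(char)
--         else:
--             # 非空格字符，直接添加到结果
--             result.append(char)
--             # 更新标志位
--             last_char_was_non_alpha_numeric = not char.isalnum()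
--
--     # 返回处理后的字符串
--     return ''.join(result)
-- ===== SOURCE B (Python) =====
-- def remove_spaces_around_symbols(s):
--     # Run-based rewrite: walk maximal runs of space / non-space; a space run is
--     # kept whole iff no non-space run has been seen yet or the last one ended
--     # in an alphanumeric character.
--     out = []
--     keep = True  # no non-space run seen yet, or it ended alphanumeric
--     i, n = 0, len(s)
--     while i < n:
--         j = i
--         if s[i].isspace():
--             while j < n and s[j].isspace():
--                 j += 1
--             if keep:
--                 out.append(s[i:j])
--         else:
--             while j < n and not s[j].isspace():
--                 j += 1
--             out.append(s[i:j])
--             keep = s[j - 1].isalnum()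
--         i = j
--     return ''.join(out)
-- ===== Notes on version B (the rewrite author's own statement) =====
-- stated objective: alternative
-- what changed: B processes the string as maximal runs of space/non-space characters (a while-loop over run boundaries with slice appends), keeping or dropping each space run wholesale based on whether the previous non-space run ended alphanumeric, instead of A's per-character loop with a per-character flag.
import Mathlib
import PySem

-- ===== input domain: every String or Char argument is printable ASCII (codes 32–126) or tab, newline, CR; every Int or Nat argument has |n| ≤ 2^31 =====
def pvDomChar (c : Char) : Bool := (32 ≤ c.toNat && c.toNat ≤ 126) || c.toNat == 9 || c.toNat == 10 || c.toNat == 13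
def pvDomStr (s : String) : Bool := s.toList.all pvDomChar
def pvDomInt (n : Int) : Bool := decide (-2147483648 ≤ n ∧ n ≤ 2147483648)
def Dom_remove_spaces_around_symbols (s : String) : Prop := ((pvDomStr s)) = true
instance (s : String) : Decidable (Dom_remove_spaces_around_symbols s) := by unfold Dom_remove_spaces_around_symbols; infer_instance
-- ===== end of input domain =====

-- B rewrites A's per-character scan (flag per char) as a scan over maximal
-- space/non-space runs, dropping or keeping each space run wholesale
-- (objective: alternative decomposition, same O(n) cost).

-- ===== PORT A =====
-- loop body of A's for-loop: state = (result, last_char_was_non_alpha_numeric)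
def pvStepA (st : List Char × Option Bool) (c : Char) : List Char × Option Bool :=
  if PySem.Chars.isspace c then
    match st.2 with
    | some true => st                    -- flag truthy: continue (skip the space)
    | _ => (st.1 ++ [c], st.2)           -- flag falsy (None/False): keep the space
  else
    (st.1 ++ [c], some (!PySem.Chars.isalnum c))

def remove_spaces_around_symbols (s : String) : String :=
  String.mk (s.toList.foldl pvStepA ([], none)).1

-- ===== PORT B =====
-- B's while-loop over run boundaries: each step consumes one maximal run
-- (takeWhile/dropWhile = the inner while-loops finding j); keep = whether the
-- last non-space run ended alphanumeric (True while none seen yet).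
def pvGoB (keep : Bool) (cs : List Char) : List Char :=
  match hcs : cs with
  | [] => []
  | c :: _ =>
    if hsp : PySem.Chars.isspace c then
      (if keep then cs.takeWhile (fun x => PySem.Chars.isspace x) else []) ++
        pvGoB keep (cs.dropWhile (fun x => PySem.Chars.isspace x))
    else
      cs.takeWhile (fun x => !PySem.Chars.isspace x) ++
        pvGoB (PySem.Chars.isalnum ((cs.takeWhile (fun x => !PySem.Chars.isspace x)).getLast!))
          (cs.dropWhile (fun x => !PySem.Chars.isspace x))
termination_by cs.length
decreasing_by
  · subst hcs; rw [List.dropWhile_cons_of_pos (by simpa using hsp)]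
    exact Nat.lt_succ_of_le (List.length_dropWhile_le _ _)
  · subst hcs; rw [List.dropWhile_cons_of_pos (by simp [eq_false_of_ne_true hsp])]
    exact Nat.lt_succ_of_le (List.length_dropWhile_le _ _)

def remove_spaces_around_symbols_alt (s : String) : String :=
  String.mk (pvGoB true s.toList)

-- ===== PRECONDITION & SPEC =====
def Spec_remove_spaces_around_symbols (s : String) (out : String) : Prop := out = remove_spaces_around_symbols_alt s
instance (s : String) (out : String) : Decidable (Spec_remove_spaces_around_symbols s out) := by unfold Spec_remove_spaces_around_symbols; infer_instance

-- ===== CLAIM (what is proved, stated in full; the proofs are below) =====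
def Claim_equal_remove_spaces_around_symbols : Prop := ∀ (s : String), Dom_remove_spaces_around_symbols s → Spec_remove_spaces_around_symbols s (remove_spaces_around_symbols s)

-- ===== LEMMAS AND PROOFS =====

-- Python truthiness of the flag (None is falsy)
def pvTruthy : Option Bool → Bool
  | some b => b
  | none => false

lemma goB_nil (k : Bool) : pvGoB k [] = [] := by rw [pvGoB]

lemma goB_space (k : Bool) (c : Char) (t : List Char) (h : PySem.Chars.isspace c = true) :
    pvGoB k (c :: t) =
      (if k then (c :: t).takeWhile (fun x => PySem.Chars.isspace x) else []) ++
        pvGoB k ((c :: t).dropWhile (fun x => PySem.Chars.isspace x)) := by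
  rw [pvGoB]; simp [h]

lemma goB_nonspace (k : Bool) (c : Char) (t : List Char) (h : PySem.Chars.isspace c = false) :
    pvGoB k (c :: t) =
      (c :: t).takeWhile (fun x => !PySem.Chars.isspace x) ++
        pvGoB (PySem.Chars.isalnum (((c :: t).takeWhile (fun x => !PySem.Chars.isspace x)).getLast!))
          ((c :: t).dropWhile (fun x => !PySem.Chars.isspace x)) := by
  rw [pvGoB]; simp [h]

-- A's loop skips a whole space run when the flag is truthy
lemma foldA_space_skip (run rest : List Char) (acc : List Char)
    (hr : ∀ c ∈ run, PySem.Chars.isspace c = true) :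
    (run ++ rest).foldl pvStepA (acc, some true) = rest.foldl pvStepA (acc, some true) := by
  induction run with
  | nil => rfl
  | cons c t ih =>
    simp only [List.cons_append, List.foldl_cons, pvStepA, hr c (by simp)]
    exact ih (fun c hc => hr c (by simp [hc]))

-- A's loop copies a whole space run when the flag is falsy
lemma foldA_space_keep (run rest : List Char) (acc : List Char) (flag : Option Bool)
    (hf : pvTruthy flag = false) (hr : ∀ c ∈ run, PySem.Chars.isspace c = true) :
    (run ++ rest).foldl pvStepA (acc, flag) = rest.foldl pvStepA (acc ++ run, flag) := by
  induction run generalizing acc with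
  | nil => simp
  | cons c t ih =>
    have hc := hr c (by simp)
    have step : pvStepA (acc, flag) c = (acc ++ [c], flag) := by
      cases flag with
      | none => simp [pvStepA, hc]
      | some b => cases b with
        | false => simp [pvStepA, hc]
        | true => simp [pvTruthy] at hf
    simp only [List.cons_append, List.foldl_cons, step]
    rw [ih (acc ++ [c]) (fun x hx => hr x (by simp [hx]))]
    simp

-- A's loop copies a whole non-space run and leaves the flag of its last char
lemma foldA_nonspace (run rest : List Char) (acc : List Char) (flag : Option Bool)
    (hne : run ≠ []) (hr : ∀ c ∈ run, PySem.Chars.isspace c = false) :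
    (run ++ rest).foldl pvStepA (acc, flag) =
      rest.foldl pvStepA (acc ++ run, some (!PySem.Chars.isalnum run.getLast!)) := by
  induction run generalizing acc flag with
  | nil => exact absurd rfl hne
  | cons c t ih =>
    have hc := hr c (by simp)
    have step : pvStepA (acc, flag) c = (acc ++ [c], some (!PySem.Chars.isalnum c)) := by
      simp [pvStepA, hc]
    cases t with
    | nil =>
      rw [List.singleton_append, List.foldl_cons, step]
      simp [List.getLast!]
    | cons c2 t2 =>
      rw [List.cons_append, List.foldl_cons, step]
      rw [ih (acc ++ [c]) (some (!PySem.Chars.isalnum c)) (by simp)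
        (fun x hx => hr x (by simp [hx]))]
      simp [List.getLast!]

-- main invariant: the fold from any state equals acc ++ the run-based scan,
-- with keep = ¬(flag truthy)
lemma foldA_eq_goB (n : ℕ) : ∀ (cs : List Char), cs.length ≤ n →
    ∀ (acc : List Char) (flag : Option Bool),
    (cs.foldl pvStepA (acc, flag)).1 = acc ++ pvGoB (!pvTruthy flag) cs := by
  induction n with
  | zero =>
    intro cs hcs acc flag
    have : cs = [] := List.eq_nil_of_length_eq_zero (Nat.le_zero.mp hcs)
    simp [this, goB_nil]
  | succ n ih =>
    intro cs hcs acc flag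
    cases hcseq : cs with
    | nil => simp [goB_nil]
    | cons c t =>
      subst hcseq
      by_cases hsp : PySem.Chars.isspace c = true
      · -- space run
        set run := (c :: t).takeWhile (fun x => PySem.Chars.isspace x) with hrun
        set rest := (c :: t).dropWhile (fun x => PySem.Chars.isspace x) with hrest
        have hsplit : run ++ rest = c :: t := List.takeWhile_append_dropWhile
        have hrall : ∀ x ∈ run, PySem.Chars.isspace x = true := by
          intro x hx
          simpa using List.mem_takeWhile_imp hx
        have hrunne : run ≠ [] := by
          simp [hrun, List.takeWhile_cons_of_pos, hsp]
        have hlen : rest.length ≤ n := by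
          have he : rest = t.dropWhile (fun x => PySem.Chars.isspace x) := by
            simp [hrest, List.dropWhile_cons_of_pos, hsp]
          have hle := List.length_dropWhile_le (fun x => PySem.Chars.isspace x) t
          have hcs' : t.length + 1 ≤ n + 1 := by simpa using hcs
          rw [he]; omega
        rw [← hsplit]
        by_cases htf : pvTruthy flag = true
        · -- flag truthy: the whole space run is dropped
          have hflag : flag = some true := by
            cases flag with
            | none => simp [pvTruthy] at htf
            | some b => cases b with
              | false => simp [pvTruthy] at htf
              | true => rfl
          rw [hflag, foldA_space_skip run rest acc hrall,
            ih rest hlen acc (some true), hsplit, goB_space _ c t hsp]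
          simp [pvTruthy, ← hrest]
        · -- flag falsy: the whole space run is kept
          have htf' : pvTruthy flag = false := by simpa using htf
          rw [foldA_space_keep run rest acc flag htf' hrall,
            ih rest hlen (acc ++ run) flag, hsplit, goB_space _ c t hsp]
          simp [htf', ← hrun, ← hrest]
      · -- non-space run
        have hsp' : PySem.Chars.isspace c = false := by simpa using hsp
        set run := (c :: t).takeWhile (fun x => !PySem.Chars.isspace x) with hrun
        set rest := (c :: t).dropWhile (fun x => !PySem.Chars.isspace x) with hrest
        have hsplit : run ++ rest = c :: t := List.takeWhile_append_dropWhile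
        have hrall : ∀ x ∈ run, PySem.Chars.isspace x = false := by
          intro x hx
          simpa using List.mem_takeWhile_imp hx
        have hrunne : run ≠ [] := by
          simp [hrun, List.takeWhile_cons_of_pos, hsp']
        have hlen : rest.length ≤ n := by
          have he : rest = t.dropWhile (fun x => !PySem.Chars.isspace x) := by
            simp [hrest, List.dropWhile_cons_of_pos, hsp']
          have hle := List.length_dropWhile_le (fun x => !PySem.Chars.isspace x) t
          have hcs' : t.length + 1 ≤ n + 1 := by simpa using hcs
          rw [he]; omega
        rw [← hsplit, foldA_nonspace run rest acc flag hrunne hrall,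
          ih rest hlen (acc ++ run) (some (!PySem.Chars.isalnum run.getLast!)),
          hsplit, goB_nonspace _ c t hsp']
        simp [pvTruthy, ← hrun, ← hrest]

-- ===== VERDICT (by name: the statement is the Claim_ definition above) =====
theorem remove_spaces_around_symbols_spec : Claim_equal_remove_spaces_around_symbols := by
  intro s _
  show _ = _
  unfold remove_spaces_around_symbols remove_spaces_around_symbols_alt
  rw [foldA_eq_goB s.toList.length s.toList le_rfl [] none]
  rfl
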